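-- pv_equiv track=rewrite | github.com/Nishaant1209/Resume-Job-Matcher | utils.py | group_keywords
-- ===== SOURCE A (Python) =====
-- KEYWORD_CATEGORIES = {
--     'technical_skills': {'python', 'sql', 'data structures', 'matlab', 'tensorflow', 'scikit-learn'},
--     'tools_platforms': {'power bi', 'tableau', 'github', 'mysql', 'firebase', 'autocad', 'figma'},
--     'domain_knowledge': {'machine learning', 'statistical analysis', 'data modeling', 'data science'},
--     'soft_skills': {'communication', 'problem-solving', 'collaboration', 'teamwork'},
-- }
--
-- def group_keywords(missing_keywords):
--     grouped = {
--         'Technical Skills': [],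
--         'Tools & Platforms': [],
--         'Domain Knowledge': [],
--         'Soft Skills': [],
--         'Uncategorized': []
--     }
--
--     for word in missing_keywords:
--         word = word.lower()
--         if word in KEYWORD_CATEGORIES['technical_skills']:
--             grouped['Technical Skills'].append(word)
--         elif word in KEYWORD_CATEGORIES['tools_platforms']:
--             grouped['Tools & Platforms'].append(word)
--         elif word in KEYWORD_CATEGORIES['domain_knowledge']:
--             grouped['Domain Knowledge'].append(word)
--         elif word in KEYWORD_CATEGORIES['soft_skills']:
--             grouped['Soft Skills'].append(word)
--         else:
--             grouped['Uncategorized'].append(word)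
--
--     return grouped
-- ===== SOURCE B (Python) =====
-- KEYWORD_CATEGORIES = {
--     'technical_skills': {'python', 'sql', 'data structures', 'matlab', 'tensorflow', 'scikit-learn'},
--     'tools_platforms': {'power bi', 'tableau', 'github', 'mysql', 'firebase', 'autocad', 'figma'},
--     'domain_knowledge': {'machine learning', 'statistical analysis', 'data modeling', 'data science'},
--     'soft_skills': {'communication', 'problem-solving', 'collaboration', 'teamwork'},
-- }
--
-- _GROUPS = [
--     ('Technical Skills', 'technical_skills'),
--     ('Tools & Platforms', 'tools_platforms'),
--     ('Domain Knowledge', 'domain_knowledge'),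
--     ('Soft Skills', 'soft_skills'),
-- ]
--
-- _ALL_KNOWN = set().union(*KEYWORD_CATEGORIES.values())
--
--
-- def group_keywords(missing_keywords):
--     # staged passes: lowercase once, then one filtering pass per category
--     # (the categories are pairwise disjoint, so filtering preserves A's
--     # first-match assignment and the relative order inside each bucket)
--     words = [w.lower() for w in missing_keywords]
--     grouped = {label: [w for w in words if w in KEYWORD_CATEGORIES[key]]
--                for label, key in _GROUPS}
--     grouped['Uncategorized'] = [w for w in words if w not in _ALL_KNOWN]
--     return grouped
-- ===== Notes on version B (the rewrite author's own statement) =====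
-- stated objective: alternative
-- what changed: Replaces A's single loop with a per-word 4-way if/elif dispatch by staged passes: one lowercasing pass, then one independent filtering pass per category plus one for unknown words (correct because the category sets are pairwise disjoint, so filtering reproduces A's first-match assignment and bucket order).
import Mathlib
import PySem

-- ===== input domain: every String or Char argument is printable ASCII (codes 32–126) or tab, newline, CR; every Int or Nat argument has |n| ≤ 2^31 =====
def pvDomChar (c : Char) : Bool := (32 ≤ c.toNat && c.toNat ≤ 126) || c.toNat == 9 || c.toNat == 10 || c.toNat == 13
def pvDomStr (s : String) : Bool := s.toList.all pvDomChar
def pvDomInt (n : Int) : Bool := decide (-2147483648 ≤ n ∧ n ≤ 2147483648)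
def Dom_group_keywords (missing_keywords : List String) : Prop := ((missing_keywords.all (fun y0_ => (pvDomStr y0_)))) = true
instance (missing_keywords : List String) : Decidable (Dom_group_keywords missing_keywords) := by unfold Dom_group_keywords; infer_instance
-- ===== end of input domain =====

-- B replaces A's single per-word if/elif dispatch loop by staged passes: one lowercasing pass,
-- then one filtering pass per (pairwise disjoint) category and one for the unknown words (objective: alternative).

-- ===== PORT A =====
def kwTech : PySem.Set String :=
  PySem.Set.ofList ["python", "sql", "data structures", "matlab", "tensorflow", "scikit-learn"]
def kwTools : PySem.Set String :=
  PySem.Set.ofList ["power bi", "tableau", "github", "mysql", "firebase", "autocad", "figma"]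
def kwDomain : PySem.Set String :=
  PySem.Set.ofList ["machine learning", "statistical analysis", "data modeling", "data science"]
def kwSoft : PySem.Set String :=
  PySem.Set.ofList ["communication", "problem-solving", "collaboration", "teamwork"]

def groupedInit : PySem.Dict String (List String) :=
  ((((PySem.Dict.empty.insert "Technical Skills" []).insert "Tools & Platforms" []).insert
      "Domain Knowledge" []).insert "Soft Skills" []).insert "Uncategorized" []

def group_keywords (missing_keywords : List String) : List (String × List String) :=
  (missing_keywords.foldl
    (fun g word =>
      let w := PySem.Str.lower word
      if kwTech.contains w then g.modify "Technical Skills" [] (· ++ [w])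
      else if kwTools.contains w then g.modify "Tools & Platforms" [] (· ++ [w])
      else if kwDomain.contains w then g.modify "Domain Knowledge" [] (· ++ [w])
      else if kwSoft.contains w then g.modify "Soft Skills" [] (· ++ [w])
      else g.modify "Uncategorized" [] (· ++ [w]))
    groupedInit).items

-- ===== PORT B =====
-- set().union(*KEYWORD_CATEGORIES.values()): every keyword of any category
def kwAll : PySem.Set String := ((kwTech.union kwTools).union kwDomain).union kwSoft

def group_keywords_alt (missing_keywords : List String) : List (String × List String) :=
  let words := missing_keywords.map PySem.Str.lower
  [("Technical Skills", words.filter (fun w => kwTech.contains w)),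
   ("Tools & Platforms", words.filter (fun w => kwTools.contains w)),
   ("Domain Knowledge", words.filter (fun w => kwDomain.contains w)),
   ("Soft Skills", words.filter (fun w => kwSoft.contains w)),
   ("Uncategorized", words.filter (fun w => !(kwAll.contains w)))]

-- ===== PRECONDITION & SPEC =====
def Spec_group_keywords (missing_keywords : List String) (out : List (String × List String)) : Prop := out = group_keywords_alt missing_keywords
instance (missing_keywords : List String) (out : List (String × List String)) : Decidable (Spec_group_keywords missing_keywords out) := by unfold Spec_group_keywords; infer_instance

-- ===== CLAIM (what is proved, stated in full; the proofs are below) =====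
def Claim_equal_group_keywords : Prop := ∀ (missing_keywords : List String), Dom_group_keywords missing_keywords → Spec_group_keywords missing_keywords (group_keywords missing_keywords)

-- ===== LEMMAS AND PROOFS =====

-- A's grouped dict with arbitrary bucket contents, as a literal association list
def gdict (t tl d s u : List String) : PySem.Dict String (List String) :=
  PySem.Dict.mk [("Technical Skills", t), ("Tools & Platforms", tl),
    ("Domain Knowledge", d), ("Soft Skills", s), ("Uncategorized", u)]

-- the category word lists, reduced to list literals
lemma kwTech_eq : kwTech = ["python", "sql", "data structures", "matlab", "tensorflow", "scikit-learn"] := by rfl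
lemma kwTools_eq : kwTools = ["power bi", "tableau", "github", "mysql", "firebase", "autocad", "figma"] := by rfl
lemma kwDomain_eq : kwDomain = ["machine learning", "statistical analysis", "data modeling", "data science"] := by rfl
lemma kwSoft_eq : kwSoft = ["communication", "problem-solving", "collaboration", "teamwork"] := by rfl
lemma kwAll_eq : kwAll = ["python", "sql", "data structures", "matlab", "tensorflow", "scikit-learn",
    "power bi", "tableau", "github", "mysql", "firebase", "autocad", "figma",
    "machine learning", "statistical analysis", "data modeling", "data science",
    "communication", "problem-solving", "collaboration", "teamwork"] := by rfl

-- the categories are pairwise disjoint: a technical keyword is in no later category, and is known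
lemma tech_only (w : String) (h : kwTech.contains w = true) :
    kwTools.contains w = false ∧ kwDomain.contains w = false ∧ kwSoft.contains w = false ∧
    kwAll.contains w = true := by
  have h' : w ∈ kwTech := List.mem_of_elem_eq_true h
  rw [kwTech_eq] at h'
  simp only [List.mem_cons, List.not_mem_nil, or_false] at h'
  rcases h' with h' | h' | h' | h' | h' | h' <;> subst h' <;> exact ⟨rfl, rfl, rfl, rfl⟩

lemma tools_only (w : String) (h : kwTools.contains w = true) :
    kwDomain.contains w = false ∧ kwSoft.contains w = false ∧ kwAll.contains w = true := by
  have h' : w ∈ kwTools := List.mem_of_elem_eq_true h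
  rw [kwTools_eq] at h'
  simp only [List.mem_cons, List.not_mem_nil, or_false] at h'
  rcases h' with h' | h' | h' | h' | h' | h' | h' <;> subst h' <;> exact ⟨rfl, rfl, rfl⟩

lemma domain_only (w : String) (h : kwDomain.contains w = true) :
    kwSoft.contains w = false ∧ kwAll.contains w = true := by
  have h' : w ∈ kwDomain := List.mem_of_elem_eq_true h
  rw [kwDomain_eq] at h'
  simp only [List.mem_cons, List.not_mem_nil, or_false] at h'
  rcases h' with h' | h' | h' | h' <;> subst h' <;> exact ⟨rfl, rfl⟩

lemma soft_only (w : String) (h : kwSoft.contains w = true) : kwAll.contains w = true := by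
  have h' : w ∈ kwSoft := List.mem_of_elem_eq_true h
  rw [kwSoft_eq] at h'
  simp only [List.mem_cons, List.not_mem_nil, or_false] at h'
  rcases h' with h' | h' | h' | h' <;> subst h' <;> rfl

-- a word in no category is not a known keyword
lemma all_false (w : String) (h1 : kwTech.contains w = false) (h2 : kwTools.contains w = false)
    (h3 : kwDomain.contains w = false) (h4 : kwSoft.contains w = false) :
    kwAll.contains w = false := by
  cases hb : kwAll.contains w with
  | false => rfl
  | true =>
    exfalso
    have h' : w ∈ kwAll := List.mem_of_elem_eq_true hb
    rw [kwAll_eq] at h'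
    simp only [List.mem_cons, List.not_mem_nil, or_false] at h'
    rcases h' with h' | h' | h' | h' | h' | h' | h' | h' | h' | h' | h' | h' | h' | h' | h' | h' | h' | h' | h' | h' | h' <;> subst h' <;>
      first
        | exact absurd h1 (by decide)
        | exact absurd h2 (by decide)
        | exact absurd h3 (by decide)
        | exact absurd h4 (by decide)

-- bridge from Bool contains facts to Prop membership (used to reduce B's filters)
lemma mem_of_c {S : PySem.Set String} {w : String} (h : S.contains w = true) : w ∈ S :=
  List.mem_of_elem_eq_true h

lemma not_mem_of_c {S : PySem.Set String} {w : String} (h : S.contains w = false) : ¬ w ∈ S :=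
  fun hm => by
    have ht : S.contains w = true := List.elem_eq_true_of_mem hm
    rw [h] at ht
    exact Bool.noConfusion ht

-- one step of A's loop on the literal dict, with the dispatch made explicit
lemma stepA_eq (t tl d s u : List String) (word : String) :
    (let w := PySem.Str.lower word
     if kwTech.contains w then (gdict t tl d s u).modify "Technical Skills" [] (· ++ [w])
     else if kwTools.contains w then (gdict t tl d s u).modify "Tools & Platforms" [] (· ++ [w])
     else if kwDomain.contains w then (gdict t tl d s u).modify "Domain Knowledge" [] (· ++ [w])
     else if kwSoft.contains w then (gdict t tl d s u).modify "Soft Skills" [] (· ++ [w])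
     else (gdict t tl d s u).modify "Uncategorized" [] (· ++ [w])) =
    (if kwTech.contains (PySem.Str.lower word) then gdict (t ++ [PySem.Str.lower word]) tl d s u
     else if kwTools.contains (PySem.Str.lower word) then gdict t (tl ++ [PySem.Str.lower word]) d s u
     else if kwDomain.contains (PySem.Str.lower word) then gdict t tl (d ++ [PySem.Str.lower word]) s u
     else if kwSoft.contains (PySem.Str.lower word) then gdict t tl d (s ++ [PySem.Str.lower word]) u
     else gdict t tl d s (u ++ [PySem.Str.lower word])) := by
  show (if kwTech.contains (PySem.Str.lower word) then
          (gdict t tl d s u).modify "Technical Skills" [] (· ++ [PySem.Str.lower word])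
        else if kwTools.contains (PySem.Str.lower word) then
          (gdict t tl d s u).modify "Tools & Platforms" [] (· ++ [PySem.Str.lower word])
        else if kwDomain.contains (PySem.Str.lower word) then
          (gdict t tl d s u).modify "Domain Knowledge" [] (· ++ [PySem.Str.lower word])
        else if kwSoft.contains (PySem.Str.lower word) then
          (gdict t tl d s u).modify "Soft Skills" [] (· ++ [PySem.Str.lower word])
        else (gdict t tl d s u).modify "Uncategorized" [] (· ++ [PySem.Str.lower word])) = _
  split_ifs <;> rfl

-- A's whole loop, characterised as B's five filters (invariant over the accumulated buckets)
lemma loopA_eq (ms : List String) (t tl d s u : List String) :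
    ms.foldl
      (fun g w0 =>
        let w := PySem.Str.lower w0
        if kwTech.contains w then g.modify "Technical Skills" [] (· ++ [w])
        else if kwTools.contains w then g.modify "Tools & Platforms" [] (· ++ [w])
        else if kwDomain.contains w then g.modify "Domain Knowledge" [] (· ++ [w])
        else if kwSoft.contains w then g.modify "Soft Skills" [] (· ++ [w])
        else g.modify "Uncategorized" [] (· ++ [w])) (gdict t tl d s u) =
    gdict (t ++ (ms.map PySem.Str.lower).filter (fun w => kwTech.contains w))
          (tl ++ (ms.map PySem.Str.lower).filter (fun w => kwTools.contains w))
          (d ++ (ms.map PySem.Str.lower).filter (fun w => kwDomain.contains w))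
          (s ++ (ms.map PySem.Str.lower).filter (fun w => kwSoft.contains w))
          (u ++ (ms.map PySem.Str.lower).filter (fun w => !(kwAll.contains w))) := by
  induction ms generalizing t tl d s u with
  | nil => simp
  | cons w0 ms ih =>
    rw [List.foldl_cons, stepA_eq]
    by_cases h1 : kwTech.contains (PySem.Str.lower w0) = true
    · obtain ⟨e2, e3, e4, e5⟩ := tech_only _ h1
      rw [if_pos h1, ih]
      simp [mem_of_c h1, not_mem_of_c e2, not_mem_of_c e3, not_mem_of_c e4, mem_of_c e5]
    · rw [if_neg h1]
      replace h1 := Bool.eq_false_iff.mpr h1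
      by_cases h2 : kwTools.contains (PySem.Str.lower w0) = true
      · obtain ⟨e3, e4, e5⟩ := tools_only _ h2
        rw [if_pos h2, ih]
        simp [not_mem_of_c h1, mem_of_c h2, not_mem_of_c e3, not_mem_of_c e4, mem_of_c e5]
      · rw [if_neg h2]
        replace h2 := Bool.eq_false_iff.mpr h2
        by_cases h3 : kwDomain.contains (PySem.Str.lower w0) = true
        · obtain ⟨e4, e5⟩ := domain_only _ h3
          rw [if_pos h3, ih]
          simp [not_mem_of_c h1, not_mem_of_c h2, mem_of_c h3, not_mem_of_c e4, mem_of_c e5]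
        · rw [if_neg h3]
          replace h3 := Bool.eq_false_iff.mpr h3
          by_cases h4 : kwSoft.contains (PySem.Str.lower w0) = true
          · have e5 := soft_only _ h4
            rw [if_pos h4, ih]
            simp [not_mem_of_c h1, not_mem_of_c h2, not_mem_of_c h3, mem_of_c h4, mem_of_c e5]
          · rw [if_neg h4]
            replace h4 := Bool.eq_false_iff.mpr h4
            have e5 := all_false _ h1 h2 h3 h4
            rw [ih]
            simp [not_mem_of_c h1, not_mem_of_c h2, not_mem_of_c h3, not_mem_of_c h4, not_mem_of_c e5]

-- ===== VERDICT (by name: the statement is the Claim_ definition above) =====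
theorem group_keywords_spec : Claim_equal_group_keywords := by
  intro ms _
  unfold Spec_group_keywords group_keywords group_keywords_alt
  rw [show groupedInit = gdict [] [] [] [] [] from rfl, loopA_eq]
  simp [gdict]
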